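-- pv_equiv track=rewrite | github.com/pauloartavares/Uni | Noughts_and_Crosses/controller.py | posicao_adjacente
-- ===== SOURCE A (Python) =====
-- def posicao_adjacente(tabuleiro, linha, coluna, simbolo, linhas, colunas):
--     #Verifica se a posição desejada é adjacente a uma peça do jogador.
--     for i in range(-1, 2): # vai verificar que a linha/coluna nas posições (-1, atual e +1) têm um símbolo igual
--         for j in range(-1, 2): # se fosse o intervalo (-1, 1) ele só verificava o (-1 e 0)
--             adj_linha = linha + i
--             adj_coluna = coluna + j
--             if 0 <= adj_linha < linhas and 0 <= adj_coluna < colunas:  # garante que a posição adjacente esteja dentro dos limites do tabuleiro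
--                 if tabuleiro.get((adj_linha, adj_coluna)) == simbolo: # vai buscar o valor naquela posição e comparar com o símbolo a introduzir
--                     return True
--     return False
-- ===== SOURCE B (Python) =====
-- def posicao_adjacente(tabuleiro, linha, coluna, simbolo, linhas, colunas):
--     # Scan the populated board cells instead of probing the 9 neighbour keys.
--     for (r, c), v in tabuleiro.items():
--         if v == simbolo and 0 <= r < linhas and 0 <= c < colunas \
--                 and max(abs(r - linha), abs(c - coluna)) <= 1:
--             return True
--     return False
-- ===== Notes on version B (the rewrite author's own statement) =====
-- stated objective: alternative
-- what changed: B scans the board's populated cells once, accepting the first cell with the player's symbol, in-bounds, and Chebyshev distance <= 1, instead of A's nested loops probing the 9 neighbour keys with dict.get.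
import Mathlib
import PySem

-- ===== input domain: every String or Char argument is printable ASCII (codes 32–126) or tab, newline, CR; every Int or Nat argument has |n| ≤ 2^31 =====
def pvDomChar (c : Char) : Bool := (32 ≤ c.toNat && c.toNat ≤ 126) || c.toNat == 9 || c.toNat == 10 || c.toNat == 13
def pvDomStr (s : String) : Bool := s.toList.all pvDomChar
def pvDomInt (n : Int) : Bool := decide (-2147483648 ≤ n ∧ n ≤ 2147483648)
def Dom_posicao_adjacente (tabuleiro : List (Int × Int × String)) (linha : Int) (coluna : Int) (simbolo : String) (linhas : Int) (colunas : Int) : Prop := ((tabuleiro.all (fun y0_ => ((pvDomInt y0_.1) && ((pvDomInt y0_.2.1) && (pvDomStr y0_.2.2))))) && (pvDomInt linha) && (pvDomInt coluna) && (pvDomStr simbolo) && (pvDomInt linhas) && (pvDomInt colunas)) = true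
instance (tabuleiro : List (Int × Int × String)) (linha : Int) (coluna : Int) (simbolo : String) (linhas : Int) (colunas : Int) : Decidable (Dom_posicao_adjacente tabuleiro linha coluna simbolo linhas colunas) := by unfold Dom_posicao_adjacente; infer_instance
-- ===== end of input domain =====

-- B scans the populated board cells once (first in-bounds cell with the symbol at Chebyshev
-- distance ≤ 1) instead of A's nine dict.get probes of the neighbourhood; objective: alternative.
-- The dict's (Int,Int) keys arrive flattened into Int × Int × String triples.

-- ===== PORT A =====
-- tabuleiro.get((r, c)) on the flattened assoc list: first entry with that key (exact dict.get)
def pvBoardGet? (t : List (Int × Int × String)) (r c : Int) : Option String :=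
  match t with
  | [] => none
  | (r', c', v) :: rest => if r' = r ∧ c' = c then some v else pvBoardGet? rest r c

def posicao_adjacente (tabuleiro : List (Int × Int × String)) (linha : Int) (coluna : Int) (simbolo : String) (linhas : Int) (colunas : Int) : Bool :=
  -- for i in range(-1,2): for j in range(-1,2): … return True  ≡  nested any over the ranges
  (PySem.List.pyRange (-1) 2 1).any (fun i =>
    (PySem.List.pyRange (-1) 2 1).any (fun j =>
      let adj_linha := linha + i
      let adj_coluna := coluna + j
      decide (0 ≤ adj_linha ∧ adj_linha < linhas ∧ 0 ≤ adj_coluna ∧ adj_coluna < colunas) &&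
        (pvBoardGet? tabuleiro adj_linha adj_coluna == some simbolo)))

-- ===== PORT B =====
def posicao_adjacente_alt (tabuleiro : List (Int × Int × String)) (linha : Int) (coluna : Int) (simbolo : String) (linhas : Int) (colunas : Int) : Bool :=
  tabuleiro.any (fun e =>
    (e.2.2 == simbolo) &&
      decide (0 ≤ e.1 ∧ e.1 < linhas ∧ 0 ≤ e.2.1 ∧ e.2.1 < colunas ∧
        max (e.1 - linha).natAbs (e.2.1 - coluna).natAbs ≤ 1))

-- ===== PRECONDITION & SPEC =====
-- Pre_ excludes assoc lists with a duplicated (row, column) key: a Python dict can never hold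
-- duplicate keys, so such lists represent no input the Python function can receive.
def Pre_posicao_adjacente (tabuleiro : List (Int × Int × String)) (linha : Int) (coluna : Int) (simbolo : String) (linhas : Int) (colunas : Int) : Prop :=
  (tabuleiro.map (fun e => (e.1, e.2.1))).Nodup
instance (tabuleiro : List (Int × Int × String)) (linha : Int) (coluna : Int) (simbolo : String) (linhas : Int) (colunas : Int) : Decidable (Pre_posicao_adjacente tabuleiro linha coluna simbolo linhas colunas) := by unfold Pre_posicao_adjacente; infer_instance

def pvWitness_posicao_adjacente : (List (Int × Int × String)) × Int × Int × String × Int × Int :=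
  ([(0, 0, "X"), (1, 2, "O")], 1, 1, "X", 3, 3)

def Spec_posicao_adjacente (tabuleiro : List (Int × Int × String)) (linha : Int) (coluna : Int) (simbolo : String) (linhas : Int) (colunas : Int) (out : Bool) : Prop := out = posicao_adjacente_alt tabuleiro linha coluna simbolo linhas colunas
instance (tabuleiro : List (Int × Int × String)) (linha : Int) (coluna : Int) (simbolo : String) (linhas : Int) (colunas : Int) (out : Bool) : Decidable (Spec_posicao_adjacente tabuleiro linha coluna simbolo linhas colunas out) := by unfold Spec_posicao_adjacente; infer_instance

-- ===== CLAIM (what is proved, stated in full; the proofs are below) =====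
def Claim_equal_posicao_adjacente : Prop := ∀ (tabuleiro : List (Int × Int × String)) (linha : Int) (coluna : Int) (simbolo : String) (linhas : Int) (colunas : Int), Dom_posicao_adjacente tabuleiro linha coluna simbolo linhas colunas → Pre_posicao_adjacente tabuleiro linha coluna simbolo linhas colunas → Spec_posicao_adjacente tabuleiro linha coluna simbolo linhas colunas (posicao_adjacente tabuleiro linha coluna simbolo linhas colunas)

-- ===== LEMMAS AND PROOFS =====

-- lookup hit ⇒ the entry is in the list
theorem pvBoardGet?_mem {t : List (Int × Int × String)} {r c : Int} {s : String}
    (h : pvBoardGet? t r c = some s) : (r, c, s) ∈ t := by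
  induction t with
  | nil => simp [pvBoardGet?] at h
  | cons hd tl ih =>
      obtain ⟨r', c', v⟩ := hd
      by_cases hk : r' = r ∧ c' = c
      · simp [pvBoardGet?, hk] at h
        subst h
        simp [hk.1, hk.2]
      · simp [pvBoardGet?, hk] at h
        exact List.mem_cons_of_mem _ (ih h)

-- with no duplicate keys, membership ⇒ lookup hit
theorem pvBoardGet?_of_mem {t : List (Int × Int × String)} {r c : Int} {s : String}
    (hnd : (t.map (fun e => (e.1, e.2.1))).Nodup)
    (h : (r, c, s) ∈ t) : pvBoardGet? t r c = some s := by
  induction t with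
  | nil => simp at h
  | cons hd tl ih =>
      obtain ⟨r', c', v⟩ := hd
      simp only [List.map_cons, List.nodup_cons] at hnd
      rcases List.mem_cons.mp h with heq | hmem
      · simp only [Prod.mk.injEq] at heq
        simp [pvBoardGet?, heq.1, heq.2.1, heq.2.2]
      · by_cases hk : r' = r ∧ c' = c
        · exfalso
          apply hnd.1
          have hm : ((r, c, s).1, (r, c, s).2.1) ∈ tl.map (fun e => (e.1, e.2.1)) :=
            List.mem_map_of_mem hmem
          simpa [hk.1, hk.2] using hm
        · simp only [pvBoardGet?, if_neg hk]
          exact ih hnd.2 hmem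

theorem posicao_adjacente_spec : Claim_equal_posicao_adjacente := by
  intro tabuleiro linha coluna simbolo linhas colunas _hDom hPre
  unfold Spec_posicao_adjacente
  rw [Bool.eq_iff_iff]
  constructor
  · -- A probed a neighbour key successfully ⇒ B's scan finds the corresponding entry
    intro h
    simp only [posicao_adjacente, List.any_eq_true, PySem.List.mem_pyRange_one,
      Bool.and_eq_true, decide_eq_true_eq, beq_iff_eq] at h
    obtain ⟨i, hi, j, hj, hb, hg⟩ := h
    have hmem := pvBoardGet?_mem hg
    simp only [posicao_adjacente_alt, List.any_eq_true, Bool.and_eq_true,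
      decide_eq_true_eq, beq_iff_eq]
    refine ⟨(linha + i, coluna + j, simbolo), hmem, rfl, ?_⟩
    dsimp only
    omega
  · -- B found a matching cell ⇒ A's probe at that key succeeds
    intro h
    simp only [posicao_adjacente_alt, List.any_eq_true, Bool.and_eq_true,
      decide_eq_true_eq, beq_iff_eq] at h
    obtain ⟨⟨r, c, v⟩, hmem, hv, hcond⟩ := h
    dsimp only at hv hcond
    have hget : pvBoardGet? tabuleiro r c = some simbolo := by
      rw [← hv]; exact pvBoardGet?_of_mem hPre hmem
    simp only [posicao_adjacente, List.any_eq_true, PySem.List.mem_pyRange_one,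
      Bool.and_eq_true, decide_eq_true_eq, beq_iff_eq]
    refine ⟨r - linha, by omega, c - coluna, by omega, by omega, ?_⟩
    rw [show linha + (r - linha) = r by omega, show coluna + (c - coluna) = c by omega]
    exact hget
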